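-- pv_equiv track=rewrite | github.com/nkanderson/intrinsic-memory-SNNs | common/sv/cocotb/tests/test_spike_buffer_staggered.py | generate_spike_pattern
-- ===== SOURCE A (Python) =====
-- NUM_NEURONS = 8  # Small for testing
--
-- NUM_TIMESTEPS = 4  # Small for testing
--
-- def get_neuron_timestep(cycle: int, neuron: int) -> int:
--     """
--     Calculate which timestep a neuron is at for a given cycle.
--     Returns -1 if neuron hasn't started yet or has finished.
--     """
--     if cycle < neuron:
--         return -1  # Neuron hasn't started
--     timestep = cycle - neuron
--     if timestep >= NUM_TIMESTEPS:
--         return -1  # Neuron has finished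
--     return timestep
--
-- def generate_spike_pattern(cycle: int, pattern: str = "all") -> int:
--     """
--     Generate spike_in value for a given cycle based on pattern.
--
--     Patterns:
--     - "all": All active neurons spike
--     - "none": No neurons spike
--     - "even": Even-indexed neurons spike
--     - "odd": Odd-indexed neurons spike
--     - "timestep": Neurons spike on even timesteps only
--     """
--     spike_in = 0
--     for n in range(NUM_NEURONS):
--         ts = get_neuron_timestep(cycle, n)
--         if ts < 0:
--             continue  # Neuron not active
--
--         spike = False
--         if pattern == "all":
--             spike = True
--         elif pattern == "none":
--             spike = False
--         elif pattern == "even":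
--             spike = n % 2 == 0
--         elif pattern == "odd":
--             spike = n % 2 == 1
--         elif pattern == "timestep":
--             spike = ts % 2 == 0
--
--         if spike:
--             spike_in |= 1 << n
--
--     return spike_in
-- ===== SOURCE B (Python) =====
-- def generate_spike_pattern(cycle: int, pattern: str = "all") -> int:
--     # Closed-form: active neurons form the contiguous bit range [lo, hi].
--     lo = max(0, cycle - 3)
--     hi = min(7, cycle)
--     if hi < lo:
--         return 0
--     active = (1 << (hi + 1)) - (1 << lo)
--     if pattern == "all":
--         return active
--     if pattern == "even":
--         return active & 0x55
--     if pattern == "odd":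
--         return active & 0xAA
--     if pattern == "timestep":
--         return active & (0x55 if cycle % 2 == 0 else 0xAA)
--     return 0
-- ===== Notes on version B (the rewrite author's own statement) =====
-- stated objective: simpler
-- what changed: Replaced A's per-neuron loop with per-neuron timestep helper by a closed-form contiguous bit-range [max(0,cycle-3), min(7,cycle)] ANDed with a constant per-pattern mask (parity of cycle for 'timestep').
import Mathlib
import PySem

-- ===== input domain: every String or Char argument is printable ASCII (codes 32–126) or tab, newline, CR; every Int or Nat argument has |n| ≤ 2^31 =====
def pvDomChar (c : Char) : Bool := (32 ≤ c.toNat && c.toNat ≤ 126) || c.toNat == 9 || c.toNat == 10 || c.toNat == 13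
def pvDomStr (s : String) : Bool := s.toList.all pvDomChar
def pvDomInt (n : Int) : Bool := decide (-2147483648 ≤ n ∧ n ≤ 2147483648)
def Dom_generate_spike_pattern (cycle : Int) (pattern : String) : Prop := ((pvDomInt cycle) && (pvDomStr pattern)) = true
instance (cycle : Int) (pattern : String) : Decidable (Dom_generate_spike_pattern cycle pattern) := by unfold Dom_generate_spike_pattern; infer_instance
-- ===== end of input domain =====

-- B replaces A's per-neuron loop by a closed-form contiguous bit-range ANDed with a per-pattern mask (objective: simpler).


-- ===== PORT A =====
def get_neuron_timestep (cycle : Int) (neuron : Int) : Int :=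
  if cycle < neuron then -1
  else
    let timestep := cycle - neuron
    if timestep ≥ 4 then -1
    else timestep

def generate_spike_pattern (cycle : Int) (pattern : String) : Int :=
  (PySem.List.pyRange 0 8 1).foldl (fun spike_in n =>
    let ts := get_neuron_timestep cycle n
    if ts < 0 then spike_in
    else
      let spike : Bool :=
        if pattern == "all" then true
        else if pattern == "none" then false
        else if pattern == "even" then PySem.Int.mod n 2 == 0
        else if pattern == "odd" then PySem.Int.mod n 2 == 1
        else if pattern == "timestep" then PySem.Int.mod ts 2 == 0
        else false
      -- 1 << n : n comes from range(8), so n.toNat is exact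
      if spike then PySem.Int.bor spike_in ((1 : Int) <<< n.toNat) else spike_in) 0

-- ===== PORT B =====
def generate_spike_pattern_alt (cycle : Int) (pattern : String) : Int :=
  let lo := max 0 (cycle - 3)
  let hi := min 7 cycle
  if hi < lo then 0
  else
    -- shift amounts are nonnegative here, so .toNat is exact
    let active := ((1 : Int) <<< (hi + 1).toNat) - ((1 : Int) <<< lo.toNat)
    if pattern == "all" then active
    else if pattern == "even" then PySem.Int.band active 0x55
    else if pattern == "odd" then PySem.Int.band active 0xAA
    else if pattern == "timestep" then
      PySem.Int.band active (if PySem.Int.mod cycle 2 == 0 then 0x55 else 0xAA)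
    else 0

-- ===== PRECONDITION & SPEC =====
def Spec_generate_spike_pattern (cycle : Int) (pattern : String) (out : Int) : Prop := out = generate_spike_pattern_alt cycle pattern
instance (cycle : Int) (pattern : String) (out : Int) : Decidable (Spec_generate_spike_pattern cycle pattern out) := by unfold Spec_generate_spike_pattern; infer_instance

-- ===== CLAIM (what is proved, stated in full; the proofs are below) =====
def Claim_equal_generate_spike_pattern : Prop := ∀ (cycle : Int) (pattern : String), Dom_generate_spike_pattern cycle pattern → Spec_generate_spike_pattern cycle pattern (generate_spike_pattern cycle pattern)

-- ===== LEMMAS AND PROOFS =====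

-- For cycle outside [0, 10] no neuron 0..7 is active: A's loop adds nothing, B's range is empty.
theorem ts_neg_of_out (cycle n : Int) (hn0 : 0 ≤ n) (hn7 : n ≤ 7)
    (h : cycle < 0 ∨ 11 ≤ cycle) : get_neuron_timestep cycle n = -1 := by
  unfold get_neuron_timestep
  dsimp only
  split_ifs <;> omega

theorem A_zero_of_out (cycle : Int) (pattern : String) (h : cycle < 0 ∨ 11 ≤ cycle) :
    generate_spike_pattern cycle pattern = 0 := by
  unfold generate_spike_pattern
  have h0 := ts_neg_of_out cycle 0 (by omega) (by omega) h
  have h1 := ts_neg_of_out cycle 1 (by omega) (by omega) h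
  have h2 := ts_neg_of_out cycle 2 (by omega) (by omega) h
  have h3 := ts_neg_of_out cycle 3 (by omega) (by omega) h
  have h4 := ts_neg_of_out cycle 4 (by omega) (by omega) h
  have h5 := ts_neg_of_out cycle 5 (by omega) (by omega) h
  have h6 := ts_neg_of_out cycle 6 (by omega) (by omega) h
  have h7 := ts_neg_of_out cycle 7 (by omega) (by omega) h
  have hr : PySem.List.pyRange 0 8 1 = [0, 1, 2, 3, 4, 5, 6, 7] := by decide
  simp [hr, List.foldl, h0, h1, h2, h3, h4, h5, h6, h7]

theorem B_zero_of_out (cycle : Int) (pattern : String) (h : cycle < 0 ∨ 11 ≤ cycle) :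
    generate_spike_pattern_alt cycle pattern = 0 := by
  unfold generate_spike_pattern_alt
  rw [if_pos]
  omega

-- An unrecognized pattern: A's spike is always false, B falls through to 0.
theorem A_zero_of_other (cycle : Int) (pattern : String)
    (h1 : pattern ≠ "all") (h2 : pattern ≠ "none") (h3 : pattern ≠ "even")
    (h4 : pattern ≠ "odd") (h5 : pattern ≠ "timestep") :
    generate_spike_pattern cycle pattern = 0 := by
  unfold generate_spike_pattern
  have hr : PySem.List.pyRange 0 8 1 = [0, 1, 2, 3, 4, 5, 6, 7] := by decide
  simp [hr, List.foldl, h1, h2, h3, h4, h5]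

theorem B_zero_of_other (cycle : Int) (pattern : String)
    (h1 : pattern ≠ "all") (h3 : pattern ≠ "even")
    (h4 : pattern ≠ "odd") (h5 : pattern ≠ "timestep") :
    generate_spike_pattern_alt cycle pattern = 0 := by
  unfold generate_spike_pattern_alt
  simp [h1, h3, h4, h5]

theorem eq_on_window (cycle : Int) (pattern : String) (h0 : 0 ≤ cycle) (h1 : cycle ≤ 10) :
    generate_spike_pattern cycle pattern = generate_spike_pattern_alt cycle pattern := by
  by_cases pa : pattern = "all"
  · subst pa; interval_cases cycle <;> decide
  · by_cases pn : pattern = "none"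
    · subst pn; interval_cases cycle <;> decide
    · by_cases pe : pattern = "even"
      · subst pe; interval_cases cycle <;> decide
      · by_cases po : pattern = "odd"
        · subst po; interval_cases cycle <;> decide
        · by_cases pt : pattern = "timestep"
          · subst pt; interval_cases cycle <;> decide
          · rw [A_zero_of_other cycle pattern pa pn pe po pt,
                B_zero_of_other cycle pattern pa pe po pt]

-- ===== VERDICT (by name: the statement is the Claim_ definition above) =====
theorem generate_spike_pattern_spec : Claim_equal_generate_spike_pattern := by
  intro cycle pattern _
  unfold Spec_generate_spike_pattern
  by_cases h : 0 ≤ cycle ∧ cycle ≤ 10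
  · exact eq_on_window cycle pattern h.1 h.2
  · have h' : cycle < 0 ∨ 11 ≤ cycle := by omega
    rw [A_zero_of_out cycle pattern h', B_zero_of_out cycle pattern h']
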